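-- pv_equiv track=rewrite | github.com/qinzhuowu/NumS2T | NumS2T_APE_0521/pre_data.py | get_middle_exp
-- ===== SOURCE A (Python) =====
-- def get_middle_exp(output_list):
--     operator=["+", "-","*", "/", "^"]
--     middle_exp=[]
--     for exp in output_list:
--         if exp in operator:
--             list_exp=[exp]
--         else:
--             list_exp=[exp,exp,exp]
--         for i in range(len(middle_exp)-1,-1,-1):
--             curr_list=middle_exp[i]
--             if curr_list[0] in operator:
--                 if len(curr_list)<3:
--                     middle_exp[i].append(exp)
--                     break
--         middle_exp.append(list_exp)
--
--     assert len(middle_exp) == len(output_list)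
--     return middle_exp
-- ===== SOURCE B (Python) =====
-- def get_middle_exp(output_list):
--     operator = {"+", "-", "*", "/", "^"}
--     middle_exp = []
--     stack = []  # indices of incomplete operator groups, top = last
--     for exp in output_list:
--         if stack:
--             top = middle_exp[stack[-1]]
--             top.append(exp)
--             if len(top) == 3:
--                 stack.pop()
--         if exp in operator:
--             stack.append(len(middle_exp))
--             middle_exp.append([exp])
--         else:
--             middle_exp.append([exp, exp, exp])
--     return middle_exp
-- ===== Notes on version B (the rewrite author's own statement) =====
-- stated objective: faster
-- what changed: Replaces A's backward scan over all previous groups at every token by a stack of indices of incomplete operator groups: append to the top and pop it when it reaches 3 elements, making each step O(1).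
import Mathlib
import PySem

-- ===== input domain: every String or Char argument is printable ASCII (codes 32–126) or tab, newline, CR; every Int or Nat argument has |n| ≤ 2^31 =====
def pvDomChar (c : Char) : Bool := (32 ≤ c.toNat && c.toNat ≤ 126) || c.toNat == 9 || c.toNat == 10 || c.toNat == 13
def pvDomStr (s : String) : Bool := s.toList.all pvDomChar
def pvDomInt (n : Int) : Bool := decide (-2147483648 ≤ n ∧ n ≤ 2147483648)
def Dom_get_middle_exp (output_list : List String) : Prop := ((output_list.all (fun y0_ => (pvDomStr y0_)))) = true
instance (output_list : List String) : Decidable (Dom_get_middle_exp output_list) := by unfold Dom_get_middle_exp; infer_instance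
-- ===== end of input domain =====

-- B replaces A's per-token backward scan over all previous groups by a stack of
-- indices of incomplete operator groups (append to top, pop when full): O(n) vs O(n^2).

-- ===== PORT A =====
def pvOps : List String := ["+", "-", "*", "/", "^"]

-- the inner 'for i in range(len(middle_exp)-1,-1,-1)' loop; counter k = i+1 (indices left)
def pvScanA (exp : String) (me : List (List String)) : Nat → List (List String)
  | 0 => me
  | k + 1 =>
    match me[k]? with
    | some curr =>
      match PySem.List.pyGet? curr 0 with
      | some h =>
        if h ∈ pvOps then
          if curr.length < 3 then me.set k (curr ++ [exp])   -- append + break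
          else pvScanA exp me k
        else pvScanA exp me k
      | none => pvScanA exp me k    -- unreachable: groups are never empty
    | none => pvScanA exp me k      -- unreachable: k < len

def pvStepA (me : List (List String)) (exp : String) : List (List String) :=
  let list_exp := if exp ∈ pvOps then [exp] else [exp, exp, exp]
  let me := pvScanA exp me me.length
  me ++ [list_exp]

def get_middle_exp (output_list : List String) : List (List String) :=
  output_list.foldl pvStepA []

-- ===== PORT B =====
-- Python stack (append/stack[-1]/pop at the end) is represented top-at-head.
def pvStepB (s : List (List String) × List Nat) (exp : String) : List (List String) × List Nat :=
  let me := s.1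
  let st :=
    match s.2 with
    | [] => (me, s.2)
    | t :: rest =>
      let top := me.getD t [] ++ [exp]
      let me' := me.set t top
      if top.length == 3 then (me', rest) else (me', t :: rest)
  let me := st.1
  let stack := st.2
  if exp ∈ pvOps then (me ++ [[exp]], me.length :: stack)
  else (me ++ [[exp, exp, exp]], stack)

def get_middle_exp_alt (output_list : List String) : List (List String) :=
  (output_list.foldl pvStepB ([], [])).1

-- ===== PRECONDITION & SPEC =====
def Spec_get_middle_exp (output_list : List String) (out : List (List String)) : Prop := out = get_middle_exp_alt output_list
instance (output_list : List String) (out : List (List String)) : Decidable (Spec_get_middle_exp output_list out) := by unfold Spec_get_middle_exp; infer_instance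

-- ===== CLAIM (what is proved, stated in full; the proofs are below) =====
def Claim_equal_get_middle_exp : Prop := ∀ (output_list : List String), Dom_get_middle_exp output_list → Spec_get_middle_exp output_list (get_middle_exp output_list)

-- ===== LEMMAS AND PROOFS =====

-- entry i of me is not an incomplete operator group (A's scan passes over it)
def pvNotInc (me : List (List String)) (i : Nat) : Prop :=
  match (me.getD i []).head? with
  | none => True
  | some h => h ∉ pvOps ∨ 3 ≤ (me.getD i []).length

-- entry t is an incomplete operator group
def pvInc (me : List (List String)) (t : Nat) : Prop :=
  ∃ h, (me.getD t []).head? = some h ∧ h ∈ pvOps ∧ (me.getD t []).length < 3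

-- invariant tying B's stack to the shared group list
def pvInv (me : List (List String)) (st : List Nat) : Prop :=
  st.Pairwise (· > ·) ∧
  (∀ t ∈ st, t < me.length ∧ pvInc me t) ∧
  (∀ i, i < me.length → i ∉ st → pvNotInc me i)

theorem pvScanA_none (exp : String) (me : List (List String)) (k : Nat)
    (h : ∀ j, j < k → pvNotInc me j) : pvScanA exp me k = me := by
  induction k with
  | zero => rfl
  | succ k ih =>
    have hk := h k (Nat.lt_succ_self k)
    have ihk : pvScanA exp me k = me := ih (fun j hj => h j (Nat.lt_succ_of_lt hj))
    unfold pvScanA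
    cases hme : me[k]? with
    | none => simpa using ihk
    | some curr =>
      have hcur : me.getD k [] = curr := by simp [List.getD, hme]
      simp only [PySem.List.pyGet?_zero]
      cases hh : curr[0]? with
      | none => simpa using ihk
      | some h0 =>
        unfold pvNotInc at hk
        rw [hcur] at hk
        have hhead : curr.head? = some h0 := by
          cases curr with
          | nil => simp at hh
          | cons a l => simpa using hh
        rw [hhead] at hk
        rcases hk with hnop | hlen
        · simp [hnop, ihk]
        · have : ¬ curr.length < 3 := by omega
          by_cases hop : h0 ∈ pvOps <;> simp [hop, this, ihk]

theorem pvScanA_hit (exp : String) (me : List (List String)) (t k : Nat)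
    (ht : t < k) (hinc : pvInc me t)
    (habove : ∀ j, t < j → j < k → pvNotInc me j) :
    pvScanA exp me k = me.set t (me.getD t [] ++ [exp]) := by
  induction k with
  | zero => omega
  | succ k ih =>
    unfold pvScanA
    by_cases hkt : k = t
    · subst hkt
      rcases hinc with ⟨h0, hhead, hop, hlen⟩
      have hlt : k < me.length := by
        by_contra hge
        have : me[k]? = none := by
          rw [List.getElem?_eq_none_iff]; omega
        simp [List.getD, this] at hhead
      have hme : me[k]? = some me[k] := List.getElem?_eq_getElem hlt
      have hgd : me.getD k [] = me[k] := by simp [List.getD, hme]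
      rw [hgd] at hhead hlen ⊢
      have hhd : PySem.List.pyGet? me[k] 0 = some h0 := by
        rw [PySem.List.pyGet?_zero]
        cases h : me[k] with
        | nil => rw [h] at hhead; simp at hhead
        | cons a l => rw [h] at hhead; simpa using hhead
      simp [hme, hhd, hop, hlen]
    · have htk : t < k := by omega
      have hk := habove k (by omega) (Nat.lt_succ_self k)
      have ihk := ih htk (fun j hj hjk => habove j hj (Nat.lt_succ_of_lt hjk))
      cases hme : me[k]? with
      | none => simpa using ihk
      | some curr =>
        have hcur : me.getD k [] = curr := by simp [List.getD, hme]
        simp only [PySem.List.pyGet?_zero]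
        cases hh : curr[0]? with
        | none => simpa using ihk
        | some h0 =>
          unfold pvNotInc at hk
          rw [hcur] at hk
          have hhead : curr.head? = some h0 := by
            cases curr with
            | nil => simp at hh
            | cons a l => simpa using hh
          rw [hhead] at hk
          rcases hk with hnop | hlen
          · simp [hnop, ihk]
          · have : ¬ curr.length < 3 := by omega
            by_cases hop : h0 ∈ pvOps <;> simp [hop, this, ihk]

-- getD is unchanged at other indices after set / at old indices after append
theorem pvGetD_set_ne (me : List (List String)) (t i : Nat) (v : List String) (h : i ≠ t) :
    (me.set t v).getD i [] = me.getD i [] := by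
  simp [List.getD, List.getElem?_set_ne (by omega : t ≠ i)]

theorem pvGetD_set_self (me : List (List String)) (t : Nat) (v : List String) (h : t < me.length) :
    (me.set t v).getD t [] = v := by
  simp [List.getD, h]

theorem pvGetD_append_lt (me ys : List (List String)) (i : Nat) (h : i < me.length) :
    (me ++ ys).getD i [] = me.getD i [] := by
  simp [List.getD, List.getElem?_append_left h]

theorem pvGetD_append_len (me : List (List String)) (v : List String) :
    (me ++ [v]).getD me.length [] = v := by
  simp [List.getD]

-- not-incomplete is preserved by appending a group at the end
theorem pvNotInc_append (me : List (List String)) (v : List String) (i : Nat)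
    (h : i < me.length) (hni : pvNotInc me i) : pvNotInc (me ++ [v]) i := by
  unfold pvNotInc at *
  rw [pvGetD_append_lt me [v] i h]
  exact hni

theorem pvGetD_append_len' (me : List (List String)) (t : Nat) (v w : List String) :
    (me.set t v ++ [w]).getD me.length [] = w := by
  simpa using pvGetD_append_len (me.set t v) w

-- one synchronized step: same group list, invariant preserved
theorem pvStep_sync (me : List (List String)) (st : List Nat) (exp : String)
    (hinv : pvInv me st) :
    pvStepA me exp = (pvStepB (me, st) exp).1 ∧
    pvInv (pvStepA me exp) (pvStepB (me, st) exp).2 := by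
  obtain ⟨hpw, hst, hni⟩ := hinv
  cases st with
  | nil =>
    have hscan : pvScanA exp me me.length = me :=
      pvScanA_none exp me me.length (fun j hj => hni j hj (by simp))
    have hlen_ok : ∀ i, i < me.length → pvNotInc me i := fun i hi => hni i hi (by simp)
    by_cases hop : exp ∈ pvOps
    · have hA : pvStepA me exp = me ++ [[exp]] := by simp [pvStepA, hscan, hop]
      have hB : pvStepB (me, ([] : List Nat)) exp = (me ++ [[exp]], [me.length]) := by
        simp [pvStepB, hop]
      rw [hA, hB]
      refine ⟨rfl, by simp, ?_, ?_⟩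
      · intro t htm
        simp at htm; subst htm
        refine ⟨by simp, ?_⟩
        unfold pvInc
        rw [pvGetD_append_len]
        exact ⟨exp, by simp, hop, by simp⟩
      · intro i hi hmem
        simp at hmem
        have hi' : i < me.length := by
          simp at hi; omega
        exact pvNotInc_append me [exp] i hi' (hlen_ok i hi')
    · have hA : pvStepA me exp = me ++ [[exp, exp, exp]] := by simp [pvStepA, hscan, hop]
      have hB : pvStepB (me, ([] : List Nat)) exp = (me ++ [[exp, exp, exp]], []) := by
        simp [pvStepB, hop]
      rw [hA, hB]
      refine ⟨rfl, by simp, by simp, ?_⟩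
      intro i hi _
      simp at hi
      rcases Nat.lt_succ_iff_lt_or_eq.mp (by omega : i < me.length + 1) with h | h
      · exact pvNotInc_append me [exp,exp,exp] i h (hlen_ok i h)
      · subst h
        unfold pvNotInc
        rw [pvGetD_append_len]
        simp
  | cons t rest =>
    have htlen : t < me.length := (hst t (by simp)).1
    have htinc : pvInc me t := (hst t (by simp)).2
    have hrest_lt : ∀ j ∈ rest, j < t := by
      intro j hj; exact List.rel_of_pairwise_cons hpw hj
    have habove : ∀ j, t < j → j < me.length → pvNotInc me j := by
      intro j hjt hjl
      refine hni j hjl ?_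
      intro hmem
      rcases List.mem_cons.mp hmem with h | h
      · omega
      · exact absurd (hrest_lt j h) (by omega)
    have hscan : pvScanA exp me me.length = me.set t (me.getD t [] ++ [exp]) :=
      pvScanA_hit exp me t me.length htlen htinc habove
    rcases htinc with ⟨h0, hhead, hop0, hlen3⟩
    have hgt' : (me.set t (me.getD t [] ++ [exp])).getD t [] = me.getD t [] ++ [exp] :=
      pvGetD_set_self me t _ htlen
    have hlen' : (me.set t (me.getD t [] ++ [exp])).length = me.length := by simp
    have hhead' : (me.getD t [] ++ [exp]).head? = some h0 := by
      cases hc : me.getD t [] with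
      | nil => rw [hc] at hhead; simp at hhead
      | cons a l => rw [hc] at hhead; simpa using hhead
    have hinc' : ∀ j ∈ rest, pvInc (me.set t (me.getD t [] ++ [exp])) j := by
      intro j hj
      have hjt : j < t := hrest_lt j hj
      have := (hst j (by simp [hj])).2
      unfold pvInc at this ⊢
      rwa [pvGetD_set_ne me t j _ (by omega)]
    have hjlen : ∀ j ∈ rest, j < me.length := fun j hj => (hst j (by simp [hj])).1
    have hni' : ∀ i, i < me.length → i ≠ t → i ∉ rest →
        pvNotInc (me.set t (me.getD t [] ++ [exp])) i := by
      intro i hi hit hir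
      have := hni i hi (by simp [hit, hir])
      unfold pvNotInc at this ⊢
      rwa [pvGetD_set_ne me t i _ hit]
    by_cases hfull : (me.getD t [] ++ [exp]).length = 3
    · -- the group at t becomes full: B pops it
      have hfl : (me[t]?.getD []).length = 2 := by
        have hgd : me.getD t [] = me[t]?.getD [] := by simp [List.getD]
        rw [← hgd]
        rw [List.length_append] at hfull
        simpa using hfull
      have hnotinc_t : pvNotInc (me.set t (me.getD t [] ++ [exp])) t := by
        unfold pvNotInc
        rw [hgt', hhead']
        right; omega
      by_cases hop : exp ∈ pvOps
      · have hA : pvStepA me exp = me.set t (me.getD t [] ++ [exp]) ++ [[exp]] := by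
          simp [pvStepA, hscan, hop]
        have hB : pvStepB (me, t :: rest) exp =
            (me.set t (me.getD t [] ++ [exp]) ++ [[exp]],
             (me.set t (me.getD t [] ++ [exp])).length :: rest) := by
          simp [pvStepB, List.getD, hfl, hop]
        rw [hA, hB]
        refine ⟨rfl, ?_, ?_, ?_⟩
        · refine List.pairwise_cons.mpr ⟨?_, List.Pairwise.sublist (List.sublist_cons_self t rest) hpw⟩
          intro j hj
          have := hjlen j hj
          simp; omega
        · intro s hs
          rcases List.mem_cons.mp hs with h | h
          · subst h
            refine ⟨by simp, ?_⟩
            unfold pvInc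
            simp only [hlen', pvGetD_append_len']
            exact ⟨exp, by simp, hop, by simp⟩
          · refine ⟨by simp; have := hjlen s h; omega, ?_⟩
            have := hinc' s h
            unfold pvInc at this ⊢
            rwa [pvGetD_append_lt _ _ _ (by simpa using hjlen s h)]
        · intro i hi hmem
          simp at hi hmem
          rcases Nat.lt_succ_iff_lt_or_eq.mp (by omega : i < me.length + 1) with h | h
          · have h' : i < (me.set t (me.getD t [] ++ [exp])).length := by simpa using h
            by_cases hit : i = t
            · subst hit; exact pvNotInc_append _ _ _ h' hnotinc_t
            · exact pvNotInc_append _ _ _ h' (hni' i h hit hmem.2)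
          · exact absurd h (by simpa using hmem.1)
      · have hA : pvStepA me exp = me.set t (me.getD t [] ++ [exp]) ++ [[exp, exp, exp]] := by
          simp [pvStepA, hscan, hop]
        have hB : pvStepB (me, t :: rest) exp =
            (me.set t (me.getD t [] ++ [exp]) ++ [[exp, exp, exp]], rest) := by
          simp [pvStepB, List.getD, hfl, hop]
        rw [hA, hB]
        refine ⟨rfl, List.Pairwise.sublist (List.sublist_cons_self t rest) hpw, ?_, ?_⟩
        · intro s hs
          refine ⟨by simp; have := hjlen s hs; omega, ?_⟩
          have := hinc' s hs
          unfold pvInc at this ⊢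
          rwa [pvGetD_append_lt _ _ _ (by simpa using hjlen s hs)]
        · intro i hi hmem
          simp at hi
          rcases Nat.lt_succ_iff_lt_or_eq.mp (by omega : i < me.length + 1) with h | h
          · have h' : i < (me.set t (me.getD t [] ++ [exp])).length := by simpa using h
            by_cases hit : i = t
            · subst hit; exact pvNotInc_append _ _ _ h' hnotinc_t
            · exact pvNotInc_append _ _ _ h' (hni' i h hit hmem)
          · subst h
            unfold pvNotInc
            simp only [hlen', pvGetD_append_len']
            simp
    · -- the group at t stays incomplete
      have hnfl : ¬ (me[t]?.getD []).length = 2 := by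
        have hgd : me.getD t [] = me[t]?.getD [] := by simp [List.getD]
        rw [← hgd]
        rw [List.length_append] at hfull
        simp only [List.length_cons, List.length_nil] at hfull
        omega
      have hlen2 : (me.getD t [] ++ [exp]).length < 3 := by
        rw [List.length_append] at hfull ⊢
        simp only [List.length_cons, List.length_nil] at hfull ⊢
        omega
      have hinc_t : ∀ v, pvInc (me.set t (me.getD t [] ++ [exp]) ++ [v]) t := by
        intro v
        unfold pvInc
        rw [pvGetD_append_lt _ _ _ (by simpa using htlen), hgt']
        exact ⟨h0, hhead', hop0, hlen2⟩
      by_cases hop : exp ∈ pvOps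
      · have hA : pvStepA me exp = me.set t (me.getD t [] ++ [exp]) ++ [[exp]] := by
          simp [pvStepA, hscan, hop]
        have hB : pvStepB (me, t :: rest) exp =
            (me.set t (me.getD t [] ++ [exp]) ++ [[exp]],
             (me.set t (me.getD t [] ++ [exp])).length :: t :: rest) := by
          simp [pvStepB, List.getD, hnfl, hop]
        rw [hA, hB]
        refine ⟨rfl, ?_, ?_, ?_⟩
        · refine List.pairwise_cons.mpr ⟨?_, hpw⟩
          intro j hj
          rcases List.mem_cons.mp hj with h | h
          · subst h; simp; omega
          · have := hrest_lt j h; simp; omega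
        · intro s hs
          rcases List.mem_cons.mp hs with h | hs2
          · subst h
            refine ⟨by simp, ?_⟩
            unfold pvInc
            simp only [hlen', pvGetD_append_len']
            exact ⟨exp, by simp, hop, by simp⟩
          · rcases List.mem_cons.mp hs2 with h | h
            · subst h
              exact ⟨by simp; omega, hinc_t _⟩
            · refine ⟨by simp; have := hjlen s h; omega, ?_⟩
              have := hinc' s h
              unfold pvInc at this ⊢
              rwa [pvGetD_append_lt _ _ _ (by simpa using hjlen s h)]
        · intro i hi hmem
          simp at hi hmem
          rcases Nat.lt_succ_iff_lt_or_eq.mp (by omega : i < me.length + 1) with h | h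
          · have h' : i < (me.set t (me.getD t [] ++ [exp])).length := by simpa using h
            exact pvNotInc_append _ _ _ h' (hni' i h hmem.2.1 hmem.2.2)
          · exact absurd h (by simpa using hmem.1)
      · have hA : pvStepA me exp = me.set t (me.getD t [] ++ [exp]) ++ [[exp, exp, exp]] := by
          simp [pvStepA, hscan, hop]
        have hB : pvStepB (me, t :: rest) exp =
            (me.set t (me.getD t [] ++ [exp]) ++ [[exp, exp, exp]], t :: rest) := by
          simp [pvStepB, List.getD, hnfl, hop]
        rw [hA, hB]
        refine ⟨rfl, hpw, ?_, ?_⟩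
        · intro s hs
          rcases List.mem_cons.mp hs with h | h
          · subst h
            exact ⟨by simp; omega, hinc_t _⟩
          · refine ⟨by simp; have := hjlen s h; omega, ?_⟩
            have := hinc' s h
            unfold pvInc at this ⊢
            rwa [pvGetD_append_lt _ _ _ (by simpa using hjlen s h)]
        · intro i hi hmem
          simp at hi hmem
          rcases Nat.lt_succ_iff_lt_or_eq.mp (by omega : i < me.length + 1) with h | h
          · have h' : i < (me.set t (me.getD t [] ++ [exp])).length := by simpa using h
            exact pvNotInc_append _ _ _ h' (hni' i h hmem.1 hmem.2)
          · subst h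
            unfold pvNotInc
            simp only [hlen', pvGetD_append_len']
            simp

theorem pvFold_sync (l : List String) (me : List (List String)) (st : List Nat)
    (hinv : pvInv me st) :
    l.foldl pvStepA me = (l.foldl pvStepB (me, st)).1 := by
  induction l generalizing me st with
  | nil => rfl
  | cons x xs ih =>
    obtain ⟨heq, hinv'⟩ := pvStep_sync me st x hinv
    simp only [List.foldl_cons]
    rw [heq] at hinv' ⊢
    exact ih _ _ hinv'

-- ===== VERDICT (by name: the statement is the Claim_ definition above) =====
theorem get_middle_exp_spec : Claim_equal_get_middle_exp := by
  intro l _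
  unfold Spec_get_middle_exp get_middle_exp get_middle_exp_alt
  exact pvFold_sync l [] [] ⟨by simp, by simp, by simp⟩
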